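-- pv_equiv track=rewrite | github.com/Lance52259/hcbp-scripts-lint | rules/st_rules/rule_008.py | _count_blank_lines_between
-- ===== SOURCE A (Python) =====
-- from typing import Callable, List, Tuple, Dict, Optional
--
-- def _count_blank_lines_between(lines: List[str], start_idx: int, end_idx: int) -> int:
--     """
--     Count blank lines between two line indices.
--
--     Args:
--         lines (List[str]): File lines
--         start_idx (int): Start line index (0-based)
--         end_idx (int): End line index (0-based)
--
--     Returns:
--         int: Number of blank lines between the indices
--     """
--     blank_lines = 0
--     for line_idx in range(start_idx + 1, end_idx):
--         if line_idx < len(lines):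
--             line_content = lines[line_idx].strip()
--             if line_content == '':
--                 blank_lines += 1
--             elif line_content.startswith('#'):
--                 # Comment lines don't count as blank lines but also don't reset the count
--                 continue
--             else:
--                 # If there's any non-comment, non-blank content, reset blank line count
--                 blank_lines = 0
--
--     return blank_lines
-- ===== SOURCE B (Python) =====
-- def _count_blank_lines_between(lines, start_idx, end_idx):
--     """Staged-pipeline reimplementation: strip the in-range window, drop
--     comment lines, then count the trailing run of empty strings."""
--     idxs = [i for i in range(start_idx + 1, end_idx) if i < len(lines)]
--     relevant = [s for s in (lines[i].strip() for i in idxs)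
--                 if not s.startswith('#')]
--     n = 0
--     for s in relevant[::-1]:
--         if s:
--             break
--         n += 1
--     return n
-- ===== Notes on version B (the rewrite author's own statement) =====
-- stated objective: alternative
-- what changed: B replaces A's single stateful loop (accumulate blanks, reset at content) by a staged pipeline: build the in-range index window, strip, filter out comment lines, and return the length of the trailing run of empty strings, counted by a reversed scan with early break.
import Mathlib
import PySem

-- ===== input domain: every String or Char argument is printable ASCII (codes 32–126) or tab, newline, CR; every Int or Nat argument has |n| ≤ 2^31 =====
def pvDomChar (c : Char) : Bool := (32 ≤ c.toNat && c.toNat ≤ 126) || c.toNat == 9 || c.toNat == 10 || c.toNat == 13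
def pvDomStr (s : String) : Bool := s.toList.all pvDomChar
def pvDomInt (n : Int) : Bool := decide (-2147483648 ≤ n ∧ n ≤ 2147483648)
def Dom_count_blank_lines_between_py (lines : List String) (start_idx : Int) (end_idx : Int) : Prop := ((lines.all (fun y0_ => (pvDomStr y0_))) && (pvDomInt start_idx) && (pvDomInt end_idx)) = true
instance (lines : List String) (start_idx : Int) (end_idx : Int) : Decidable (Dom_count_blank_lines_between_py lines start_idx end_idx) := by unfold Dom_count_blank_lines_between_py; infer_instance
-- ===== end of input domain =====

-- B computes the same RETURN value by a staged pipeline (window → strip → drop comments →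
-- trailing-empty run) instead of A's stateful accumulate-and-reset loop; equality proved on Pre_.

-- ===== PORT A =====
-- loop body of A's for-loop, as a named helper
def pvAStep (lines : List String) (blank_lines : Int) (line_idx : Int) : Int :=
  if line_idx < (lines.length : Int) then
    let line_content := PySem.Str.strip ((PySem.List.pyGet? lines line_idx).getD "")
    if line_content = "" then blank_lines + 1
    else if PySem.Str.startswith line_content "#" then blank_lines
    else 0
  else blank_lines

def count_blank_lines_between_py (lines : List String) (start_idx : Int) (end_idx : Int) : Int :=
  (PySem.List.pyRange (start_idx + 1) end_idx 1).foldl (pvAStep lines) 0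

-- ===== PORT B =====
-- B's final loop: walk the reversed list, add 1 per empty string, break at the first nonempty
def pvCountLeadingEmpty : List String → Int
  | [] => 0
  | s :: t => if s = "" then pvCountLeadingEmpty t + 1 else 0

def count_blank_lines_between_py_alt (lines : List String) (start_idx : Int) (end_idx : Int) : Int :=
  let idxs := (PySem.List.pyRange (start_idx + 1) end_idx 1).filter
      (fun i => i < (lines.length : Int))
  let relevant := (idxs.map
      (fun i => PySem.Str.strip ((PySem.List.pyGet? lines i).getD ""))).filter
      (fun t => !(PySem.Str.startswith t "#"))
  pvCountLeadingEmpty relevant.reverse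

-- ===== PRECONDITION & SPEC =====
-- Pre_ excludes exactly the inputs where Python A raises IndexError: a nonempty range whose
-- first index is below -len(lines) (negative-index underflow on lines[line_idx]).
def Pre_count_blank_lines_between_py (lines : List String) (start_idx : Int) (end_idx : Int) : Prop :=
  end_idx ≤ start_idx + 1 ∨ -(lines.length : Int) ≤ start_idx + 1

instance (lines : List String) (start_idx : Int) (end_idx : Int) : Decidable (Pre_count_blank_lines_between_py lines start_idx end_idx) := by unfold Pre_count_blank_lines_between_py; infer_instance

def pvWitness_count_blank_lines_between_py : List String × Int × Int := (["a", "", ""], 0, 3)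

def Spec_count_blank_lines_between_py (lines : List String) (start_idx : Int) (end_idx : Int) (out : Int) : Prop := out = count_blank_lines_between_py_alt lines start_idx end_idx
instance (lines : List String) (start_idx : Int) (end_idx : Int) (out : Int) : Decidable (Spec_count_blank_lines_between_py lines start_idx end_idx out) := by unfold Spec_count_blank_lines_between_py; infer_instance

-- ===== CLAIM =====
def Claim_equal_count_blank_lines_between_py : Prop := ∀ (lines : List String) (start_idx : Int) (end_idx : Int), Dom_count_blank_lines_between_py lines start_idx end_idx → Pre_count_blank_lines_between_py lines start_idx end_idx → Spec_count_blank_lines_between_py lines start_idx end_idx (count_blank_lines_between_py lines start_idx end_idx)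

-- ===== LEMMAS AND PROOFS =====

-- B's pipeline applied to an arbitrary index list
def pvPipe (lines : List String) (L : List Int) : List String :=
  ((L.filter (fun i => i < (lines.length : Int))).map
      (fun i => PySem.Str.strip ((PySem.List.pyGet? lines i).getD ""))).filter
      (fun t => !(PySem.Str.startswith t "#"))

lemma pvPipe_append (lines : List String) (xs ys : List Int) :
    pvPipe lines (xs ++ ys) = pvPipe lines xs ++ pvPipe lines ys := by
  simp [pvPipe]

lemma pvKey (lines : List String) (L : List Int) :
    L.foldl (pvAStep lines) 0 = pvCountLeadingEmpty (pvPipe lines L).reverse := by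
  induction L using List.reverseRecOn with
  | nil => simp [pvPipe, pvCountLeadingEmpty]
  | append_singleton xs i ih =>
    rw [List.foldl_append, List.foldl_cons, List.foldl_nil, ih, pvPipe_append,
        List.reverse_append]
    by_cases h1 : i < (lines.length : Int)
    · by_cases h2 : PySem.Str.strip ((PySem.List.pyGet? lines i).getD "") = ""
      · have hsw : PySem.Str.startswith "" "#" = false := by decide
        have hp : pvPipe lines [i] = [""] := by simp [pvPipe, h1, h2]; decide
        have hA : ∀ c : Int, pvAStep lines c i = c + 1 := by
          intro c; simp only [pvAStep]; rw [if_pos h1, if_pos h2]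
        rw [hp, List.reverse_singleton, List.singleton_append, hA]
        simp [pvCountLeadingEmpty]
      · by_cases h3 : PySem.Str.startswith (PySem.Str.strip ((PySem.List.pyGet? lines i).getD "")) "#" = true
        · have hp : pvPipe lines [i] = [] := by simp [pvPipe, h1]; simpa using h3
          have hA : ∀ c : Int, pvAStep lines c i = c := by
            intro c; simp only [pvAStep]; rw [if_pos h1, if_neg h2, if_pos h3]
          rw [hp, List.reverse_nil, List.nil_append, hA]
        · have h3' : PySem.Str.startswith (PySem.Str.strip ((PySem.List.pyGet? lines i).getD "")) "#" = false := by
            simpa using h3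
          have hp : pvPipe lines [i] = [PySem.Str.strip ((PySem.List.pyGet? lines i).getD "")] := by
            simp [pvPipe, h1]; simpa using h3' 
          have hA : ∀ c : Int, pvAStep lines c i = 0 := by
            intro c; simp only [pvAStep]; rw [if_pos h1, if_neg h2, if_neg h3]
          rw [hp, List.reverse_singleton, List.singleton_append, hA]
          simp [pvCountLeadingEmpty, h2]
    · have hp : pvPipe lines [i] = [] := by simp [pvPipe, h1]
      have hA : ∀ c : Int, pvAStep lines c i = c := by
        intro c; simp only [pvAStep]; rw [if_neg h1]
      rw [hp, List.reverse_nil, List.nil_append, hA]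

-- ===== VERDICT =====
theorem count_blank_lines_between_py_spec : Claim_equal_count_blank_lines_between_py := by
  intro lines s e _ _
  show _ = _
  unfold count_blank_lines_between_py count_blank_lines_between_py_alt
  exact pvKey lines (PySem.List.pyRange (s + 1) e 1)
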